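-- pv_equiv track=rewrite | github.com/zen-ham/zhmiscellany | src/zhmiscellany/list.py | split_into_n_groups
-- ===== SOURCE A (Python) =====
-- def split_into_n_groups(lst, n):
--     avg_size = len(lst) // n
--     remainder = len(lst) % n
--     sublists = []
--
--     start = 0
--     for i in range(n):
--         end = start + avg_size + (1 if i < remainder else 0)  # Distribute remainder
--         sublists.append(lst[start:end])
--         start = end
--
--     return sublists
-- ===== SOURCE B (Python) =====
-- def split_into_n_groups(lst, n):
--     groups = []
--     end = len(lst)
--     while n > 0:
--         cut = end - end // n
--         groups.append(lst[cut:end])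
--         end = cut
--         n -= 1
--     groups.reverse()
--     return groups
-- ===== Notes on version B (the rewrite author's own statement) =====
-- stated objective: alternative
-- what changed: Replaces A's forward loop that precomputes avg/remainder and threads a running start index by a loop that repeatedly peels the LAST group of floor(end/n) elements off the end (recomputing the floor division each step, with no remainder-distribution logic), then reverses the collected groups.
-- outside the precondition, e.g. on split_into_n_groups([1, 2, 3], 0): A raises ZeroDivisionError, B returns []
import Mathlib
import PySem

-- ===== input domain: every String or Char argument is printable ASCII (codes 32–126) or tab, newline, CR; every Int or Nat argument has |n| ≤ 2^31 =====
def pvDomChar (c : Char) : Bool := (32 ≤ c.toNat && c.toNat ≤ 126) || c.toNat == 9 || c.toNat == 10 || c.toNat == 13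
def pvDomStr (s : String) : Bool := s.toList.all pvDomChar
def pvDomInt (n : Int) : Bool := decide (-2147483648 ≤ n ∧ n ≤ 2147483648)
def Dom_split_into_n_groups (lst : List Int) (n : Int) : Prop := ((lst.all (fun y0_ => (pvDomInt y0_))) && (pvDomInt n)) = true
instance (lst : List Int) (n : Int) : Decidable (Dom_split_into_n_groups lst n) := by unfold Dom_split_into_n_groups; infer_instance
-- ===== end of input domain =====

-- B replaces A's forward loop (precomputed avg/remainder, running start index) by a
-- loop that peels the LAST group of floor(end/n) elements off the end, moves the end
-- index down, decrements n, and reverses the collected groups (alternative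
-- decomposition, no remainder-distribution bookkeeping).

-- ===== PORT A =====
def split_into_n_groups (lst : List Int) (n : Int) : List (List Int) :=
  let avg_size := PySem.Int.floordiv (lst.length : Int) n
  let remainder := PySem.Int.mod (lst.length : Int) n
  ((PySem.List.pyRange 0 n 1).foldl
    (fun (p : List (List Int) × Int) i =>
      let e := p.2 + avg_size + (if i < remainder then 1 else 0)
      (p.1 ++ [PySem.List.slice lst (some p.2) (some e)], e))
    ([], 0)).1

-- ===== PORT B =====
-- the while loop of Source B: peel the last group, move the end index down, decrement n
def splitPeelLoop (lst : List Int) (n : Int) (e : Int) (groups : List (List Int)) : List (List Int) :=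
  if _h : n ≤ 0 then groups
  else
    let cut := e - PySem.Int.floordiv e n
    splitPeelLoop lst (n - 1) cut (groups ++ [PySem.List.slice lst (some cut) (some e)])
termination_by n.toNat
decreasing_by omega

def split_into_n_groups_alt (lst : List Int) (n : Int) : List (List Int) :=
  (splitPeelLoop lst n (lst.length : Int) []).reverse

-- ===== PRECONDITION & SPEC =====
-- Pre_ excludes exactly n = 0, on which A raises ZeroDivisionError.
def Pre_split_into_n_groups (lst : List Int) (n : Int) : Prop := n ≠ 0
instance (lst : List Int) (n : Int) : Decidable (Pre_split_into_n_groups lst n) := by unfold Pre_split_into_n_groups; infer_instance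
def pvWitness_split_into_n_groups : List Int × Int := ([1, 2, 3, 4, 5], 2)
def Spec_split_into_n_groups (lst : List Int) (n : Int) (out : List (List Int)) : Prop := out = split_into_n_groups_alt lst n
instance (lst : List Int) (n : Int) (out : List (List Int)) : Decidable (Spec_split_into_n_groups lst n out) := by unfold Spec_split_into_n_groups; infer_instance

-- ===== CLAIM (what is proved, stated in full; the proofs are below) =====
def Claim_equal_split_into_n_groups : Prop := ∀ (lst : List Int) (n : Int), Dom_split_into_n_groups lst n → Pre_split_into_n_groups lst n → Spec_split_into_n_groups lst n (split_into_n_groups lst n)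

-- ===== LEMMAS AND PROOFS =====

-- A's loop, started at position a with start index a*avg + min a rem, produces
-- exactly the closed-form slices for the remaining indices.
lemma split_loop_eq (lst : List Int) (avg rem : Int) :
    ∀ (k : Nat) (a n : Int), (n - a).toNat = k → ∀ (acc : List (List Int)),
    ((PySem.List.pyRange a n 1).foldl
      (fun (p : List (List Int) × Int) i =>
        let e := p.2 + avg + (if i < rem then 1 else 0)
        (p.1 ++ [PySem.List.slice lst (some p.2) (some e)], e))
      (acc, a * avg + min a rem)).1
    = acc ++ (PySem.List.pyRange a n 1).map (fun i =>
        PySem.List.slice lst (some (i * avg + min i rem)) (some ((i + 1) * avg + min (i + 1) rem))) := by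
  intro k
  induction k with
  | zero =>
    intro a n hk acc
    rw [PySem.List.pyRange_one_eq_nil (by omega)]
    simp
  | succ k ih =>
    intro a n hk acc
    by_cases hab : a < n
    · rw [PySem.List.pyRange_one_cons hab]
      simp only [List.foldl_cons, List.map_cons]
      have hstep : a * avg + min a rem + avg + (if a < rem then 1 else 0)
          = (a + 1) * avg + min (a + 1) rem := by
        by_cases h : a < rem <;> simp [h] <;> ring_nf <;> omega
      rw [hstep]
      rw [ih (a + 1) n (by omega)]
      simp
    · rw [PySem.List.pyRange_one_eq_nil (by omega)]
      simp

-- B's end-peeling loop accumulates the closed-form slices in reverse order.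
lemma peel_eq_map (lst : List Int) :
    ∀ (k : Nat) (n : Int), n.toNat = k → ∀ (e : Int), 0 ≤ e → ∀ (acc : List (List Int)),
    splitPeelLoop lst n e acc
    = acc ++ ((PySem.List.pyRange 0 n 1).map (fun i =>
        PySem.List.slice lst
          (some (i * PySem.Int.floordiv e n + min i (PySem.Int.mod e n)))
          (some ((i + 1) * PySem.Int.floordiv e n + min (i + 1) (PySem.Int.mod e n))))).reverse := by
  intro k
  induction k with
  | zero =>
    intro n hk e _ acc
    rw [splitPeelLoop, dif_pos (by omega), PySem.List.pyRange_one_eq_nil (by omega)]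
    simp
  | succ k ih =>
    intro n hk e he acc
    by_cases hn0 : n ≤ 0
    · rw [splitPeelLoop, dif_pos hn0, PySem.List.pyRange_one_eq_nil (by omega)]
      simp
    have hn : 0 < n := by omega
    have hq : PySem.Int.floordiv e n = e / n := PySem.Int.floordiv_eq_ediv_of_pos hn
    have hr : PySem.Int.mod e n = e % n := PySem.Int.mod_eq_emod_of_pos hn
    have hrnn : 0 ≤ PySem.Int.mod e n := by rw [hr]; exact Int.emod_nonneg _ (by omega)
    have hrlt : PySem.Int.mod e n < n := by rw [hr]; exact Int.emod_lt_of_pos _ hn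
    have hq0 : 0 ≤ PySem.Int.floordiv e n := by rw [hq]; exact Int.ediv_nonneg he (le_of_lt hn)
    have hqle : PySem.Int.floordiv e n ≤ e := by rw [hq]; exact Int.ediv_le_self _ he
    have hlen : n * PySem.Int.floordiv e n + PySem.Int.mod e n = e := by
      rw [hq, hr]; exact Int.mul_ediv_add_emod _ _
    set q := PySem.Int.floordiv e n with hqdef
    set r := PySem.Int.mod e n with hrdef
    rw [splitPeelLoop, dif_neg (show ¬ n ≤ 0 by omega)]
    simp only []
    set cut := e - q with hcutdef
    have hcut0 : (0:Int) ≤ cut := by omega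
    have hcutform : (n - 1) * q + r = cut := by rw [hcutdef, ← hlen]; ring
    -- the shrunk range's own quotient/remainder give the same boundary formula
    have hbound : ∀ i : Int, 0 ≤ i → i ≤ n - 1 → 2 ≤ n →
        i * PySem.Int.floordiv cut (n-1) + min i (PySem.Int.mod cut (n-1))
        = i * q + min i r := by
      intro i hi0 hile hn2
      by_cases hreq : r = n - 1
      · have hc : cut = (q + 1) * (n - 1) := by rw [hcutdef, ← hlen, hreq]; ring
        have hq' : PySem.Int.floordiv cut (n-1) = q + 1 := by
          rw [PySem.Int.floordiv_eq_ediv_of_pos (by omega), hc,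
            Int.mul_ediv_cancel _ (by omega)]
        have hr' : PySem.Int.mod cut (n-1) = 0 := by
          rw [PySem.Int.mod_eq_emod_of_pos (by omega), hc, Int.mul_emod_left]
        rw [hq', hr', min_eq_right hi0, min_eq_left (by omega : i ≤ r)]
        ring
      · have hc : cut = r + q * (n - 1) := by rw [hcutdef, ← hlen]; ring
        have hq' : PySem.Int.floordiv cut (n-1) = q := by
          rw [PySem.Int.floordiv_eq_ediv_of_pos (by omega), hc,
            Int.add_mul_ediv_right _ _ (by omega : n - 1 ≠ 0),
            Int.ediv_eq_zero_of_lt hrnn (by omega)]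
          ring
        have hr' : PySem.Int.mod cut (n-1) = r := by
          rw [PySem.Int.mod_eq_emod_of_pos (by omega), hc, Int.add_mul_emod_self_right _ _ _,
            Int.emod_eq_of_lt hrnn (by omega)]
        rw [hq', hr']
    rw [ih (n - 1) (by omega) cut hcut0 (acc ++ [PySem.List.slice lst (some cut) (some e)])]
    have hmapinit :
        (PySem.List.pyRange 0 (n-1) 1).map (fun i =>
          PySem.List.slice lst
            (some (i * PySem.Int.floordiv cut (n-1) + min i (PySem.Int.mod cut (n-1))))
            (some ((i + 1) * PySem.Int.floordiv cut (n-1) + min (i + 1) (PySem.Int.mod cut (n-1)))))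
        = (PySem.List.pyRange 0 (n-1) 1).map (fun i =>
          PySem.List.slice lst (some (i * q + min i r)) (some ((i + 1) * q + min (i + 1) r))) := by
      apply List.map_congr_left
      intro i hi
      have hib := (PySem.List.mem_pyRange_one).1 hi
      rw [hbound i (by omega) (by omega) (by omega), hbound (i+1) (by omega) (by omega) (by omega)]
    have hlast : PySem.List.slice lst (some cut) (some e)
        = PySem.List.slice lst (some ((n - 1) * q + min (n - 1) r))
            (some ((n - 1 + 1) * q + min (n - 1 + 1) r)) := by
      have e1 : (n - 1) * q + min (n - 1) r = cut := by
        rw [min_eq_right (by omega)]; exact hcutform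
      have e2 : (n - 1 + 1) * q + min (n - 1 + 1) r = e := by
        rw [min_eq_right (by omega), ← hlen]; ring
      rw [e1, e2]
    rw [PySem.List.pyRange_one_append 0 (n-1) n (by omega) (by omega), List.map_append,
      List.reverse_append]
    rw [show PySem.List.pyRange (n-1) n 1 = [n-1] from by
      rw [PySem.List.pyRange_one_cons (by omega), PySem.List.pyRange_one_eq_nil (by omega)]]
    rw [hmapinit, hlast]
    simp

-- ===== VERDICT (by name: the statement is the Claim_ definition above) =====
theorem split_into_n_groups_spec : Claim_equal_split_into_n_groups := by
  intro lst n _ hn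
  unfold Spec_split_into_n_groups
  by_cases hpos : 0 < n
  · unfold split_into_n_groups
    simp only []
    have hrem : 0 ≤ PySem.Int.mod (lst.length : Int) n := PySem.Int.mod_nonneg _ hpos
    have hA := split_loop_eq lst (PySem.Int.floordiv (lst.length : Int) n)
      (PySem.Int.mod (lst.length : Int) n) n.toNat 0 n (by omega) []
    rw [show (0 : Int) * PySem.Int.floordiv (lst.length : Int) n
        + min 0 (PySem.Int.mod (lst.length : Int) n) = 0 by
      rw [min_eq_left hrem]; ring] at hA
    unfold split_into_n_groups_alt
    rw [peel_eq_map lst n.toNat n rfl (lst.length : Int) (by positivity) []]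
    simpa using hA
  · have hneg : n ≤ 0 := by omega
    unfold split_into_n_groups split_into_n_groups_alt
    rw [splitPeelLoop]
    rw [PySem.List.pyRange_one_eq_nil (by omega)]
    simp [hneg]
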